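-- pv_equiv track=rewrite | github.com/catppuccin/catppuccin | samples/python1.py | tf_filter_status
-- ===== SOURCE A (Python) =====
-- def tf_filter_status(result):
--     filtered = []
--     can_add = False
--     for line in result.split('\n'):
--         if line.startswith('$'):
--             can_add = True
--             continue
--         if line == '':
--             can_add = False
--             continue
--         if can_add:
--             filtered.append(line)
--
--     return filtered
-- ===== SOURCE B (Python) =====
-- def _flush(block):
--     # lines after the first '$'-marker of the block, markers themselves dropped
--     for i, l in enumerate(block):
--         if l.startswith('$'):
--             return [x for x in block[i + 1:] if not x.startswith('$')]
--     return []
--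
--
-- def tf_filter_status(result):
--     out = []
--     block = []
--     for line in result.split('\n') + ['']:
--         if line == '':
--             out.extend(_flush(block))
--             block = []
--         else:
--             block.append(line)
--     return out
-- ===== Notes on version B (the rewrite author's own statement) =====
-- stated objective: alternative
-- what changed: Replaced A's single pass with a can_add flag by a two-stage decomposition: gather blank-separated blocks of lines, then for each block emit the lines after its first dollar-marker line, markers dropped.
import Mathlib
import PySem

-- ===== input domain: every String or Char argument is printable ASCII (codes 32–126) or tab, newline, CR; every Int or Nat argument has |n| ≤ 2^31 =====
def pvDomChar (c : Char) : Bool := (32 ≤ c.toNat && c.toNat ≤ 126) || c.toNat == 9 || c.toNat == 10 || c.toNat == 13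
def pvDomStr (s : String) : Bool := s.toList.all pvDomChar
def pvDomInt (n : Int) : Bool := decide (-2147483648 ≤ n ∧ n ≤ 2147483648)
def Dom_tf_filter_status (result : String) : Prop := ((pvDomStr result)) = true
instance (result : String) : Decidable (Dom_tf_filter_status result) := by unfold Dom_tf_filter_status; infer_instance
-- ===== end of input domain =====

-- B replaces A's flag-toggling single pass by a group-then-scan decomposition
-- (gather blank-separated blocks, keep each block's lines after its first '$'
-- marker, markers dropped); objective: alternative decomposition, same cost.

-- ===== PORT A =====
-- A's loop body over state (filtered, can_add)
def pvStepA (st : List String × Bool) (line : String) : List String × Bool :=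
  if PySem.Str.startswith line "$" then (st.1, true)
  else if line == "" then (st.1, false)
  else if st.2 then (st.1 ++ [line], st.2) else st

def tf_filter_status (result : String) : List String :=
  (((PySem.Str.split? result "\n").getD []).foldl pvStepA ([], false)).1

-- ===== PORT B =====
-- _flush: early-return loop over the block, ported as structural recursion
def pvFlush : List String → List String
  | [] => []
  | l :: rest =>
      if PySem.Str.startswith l "$" then
        rest.filter (fun x => !PySem.Str.startswith x "$")
      else pvFlush rest

-- B's loop body over state (out, block)
def pvStepB (st : List String × List String) (line : String) : List String × List String :=
  if line == "" then (st.1 ++ pvFlush st.2, [])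
  else (st.1, st.2 ++ [line])

def tf_filter_status_alt (result : String) : List String :=
  ((((PySem.Str.split? result "\n").getD []) ++ [""]).foldl pvStepB ([], [])).1

-- ===== PRECONDITION & SPEC =====
def Spec_tf_filter_status (result : String) (out : List String) : Prop := out = tf_filter_status_alt result
instance (result : String) (out : List String) : Decidable (Spec_tf_filter_status result out) := by unfold Spec_tf_filter_status; infer_instance

-- ===== CLAIM (what is proved, stated in full; the proofs are below) =====
def Claim_equal_tf_filter_status : Prop := ∀ (result : String), Dom_tf_filter_status result → Spec_tf_filter_status result (tf_filter_status result)

-- ===== LEMMAS AND PROOFS =====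

theorem pv_startswith_empty : PySem.Str.startswith "" "$" = false := by decide

theorem pvStepA_dollar (st : List String × Bool) (line : String)
    (h : PySem.Str.startswith line "$" = true) : pvStepA st line = (st.1, true) := by
  rw [pvStepA, if_pos h]

theorem pvStepA_empty (st : List String × Bool) : pvStepA st "" = (st.1, false) := by
  rw [pvStepA, if_neg (ne_true_of_eq_false pv_startswith_empty), if_pos (by decide)]

theorem pvStepA_plain (st : List String × Bool) (line : String)
    (h1 : PySem.Str.startswith line "$" = false) (h2 : line ≠ "") :
    pvStepA st line = if st.2 then (st.1 ++ [line], st.2) else st := by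
  rw [pvStepA, if_neg (ne_true_of_eq_false h1), if_neg (by simpa using h2)]

theorem pvStepB_empty (st : List String × List String) :
    pvStepB st "" = (st.1 ++ pvFlush st.2, []) := by
  rw [pvStepB, if_pos (by decide)]

theorem pvStepB_plain (st : List String × List String) (line : String) (h : line ≠ "") :
    pvStepB st line = (st.1, st.2 ++ [line]) := by
  rw [pvStepB, if_neg (by simpa using h)]

theorem pvFlush_nil_of_no_dollar (block : List String)
    (h : block.any (fun x => PySem.Str.startswith x "$") = false) :
    pvFlush block = [] := by
  induction block with
  | nil => rfl
  | cons l rest ih =>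
      rw [List.any_cons, Bool.or_eq_false_iff] at h
      rw [pvFlush, if_neg (ne_true_of_eq_false h.1), ih h.2]

theorem pvFlush_append_dollar (block : List String) (l : String)
    (hl : PySem.Str.startswith l "$" = true) :
    pvFlush (block ++ [l]) = pvFlush block := by
  induction block with
  | nil =>
      rw [List.nil_append]
      have h1 : pvFlush [l] = [] := by
        rw [pvFlush, if_pos hl, List.filter_nil]
      rw [h1]
      rfl
  | cons b rest ih =>
      rw [List.cons_append, pvFlush, pvFlush]
      by_cases hb : PySem.Str.startswith b "$" = true
      · rw [if_pos hb, if_pos hb, List.filter_append, List.filter_cons, hl,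
          Bool.not_true, if_neg Bool.false_ne_true, List.filter_nil, List.append_nil]
      · rw [if_neg hb, if_neg hb, ih]

theorem pvFlush_append_plain (block : List String) (l : String)
    (hl : PySem.Str.startswith l "$" = false)
    (ha : block.any (fun x => PySem.Str.startswith x "$") = true) :
    pvFlush (block ++ [l]) = pvFlush block ++ [l] := by
  induction block with
  | nil => simp at ha
  | cons b rest ih =>
      rw [List.any_cons, Bool.or_eq_true] at ha
      rw [List.cons_append, pvFlush, pvFlush]
      by_cases hb : PySem.Str.startswith b "$" = true
      · rw [if_pos hb, if_pos hb, List.filter_append, List.filter_cons, hl,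
          Bool.not_false, if_pos rfl, List.filter_nil]
      · rcases ha with ha | ha
        · exact absurd ha hb
        · rw [if_neg hb, if_neg hb, ih ha]

theorem pv_any_append_one (block : List String) (l : String) :
    (block ++ [l]).any (fun x => PySem.Str.startswith x "$")
      = (block.any (fun x => PySem.Str.startswith x "$") || PySem.Str.startswith l "$") := by
  rw [List.any_append, List.any_cons, List.any_nil, Bool.or_false]

theorem pv_main (lines : List String) (out block : List String) :
    (lines.foldl pvStepA
        (out ++ pvFlush block, block.any (fun x => PySem.Str.startswith x "$"))).1
    = ((lines ++ [""]).foldl pvStepB (out, block)).1 := by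
  induction lines generalizing out block with
  | nil =>
      rw [List.nil_append, List.foldl_cons, List.foldl_nil, List.foldl_nil, pvStepB_empty]
  | cons line rest ih =>
      rw [List.cons_append, List.foldl_cons, List.foldl_cons]
      by_cases he : line = ""
      · subst he
        rw [pvStepA_empty, pvStepB_empty]
        have h0 := ih (out ++ pvFlush block) []
        rw [show pvFlush ([] : List String) = [] from rfl, List.append_nil,
          List.any_nil] at h0
        exact h0
      · by_cases hd : PySem.Str.startswith line "$" = true
        · rw [pvStepA_dollar _ _ hd, pvStepB_plain _ _ he]
          have h0 := ih out (block ++ [line])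
          rw [pvFlush_append_dollar block line hd, pv_any_append_one, hd,
            Bool.or_true] at h0
          exact h0
        · rw [Bool.not_eq_true] at hd
          rw [pvStepA_plain _ _ hd he, pvStepB_plain _ _ he]
          have h0 := ih out (block ++ [line])
          rw [pv_any_append_one, hd, Bool.or_false] at h0
          by_cases ha : block.any (fun x => PySem.Str.startswith x "$") = true
          · rw [ha] at h0 ⊢
            rw [if_pos rfl]
            rw [pvFlush_append_plain block line hd ha, ← List.append_assoc] at h0
            exact h0
          · rw [Bool.not_eq_true] at ha
            rw [ha] at h0 ⊢
            rw [if_neg Bool.false_ne_true]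
            rw [pvFlush_nil_of_no_dollar (block ++ [line])
              (by rw [pv_any_append_one, ha, hd, Bool.or_false])] at h0
            rw [pvFlush_nil_of_no_dollar block ha]
            exact h0

-- ===== VERDICT (by name: the statement is the Claim_ definition above) =====
theorem tf_filter_status_spec : Claim_equal_tf_filter_status := by
  intro result _
  unfold Spec_tf_filter_status tf_filter_status tf_filter_status_alt
  have h0 := pv_main ((PySem.Str.split? result "\n").getD []) [] []
  rw [show pvFlush ([] : List String) = [] from rfl, List.any_nil] at h0
  exact h0
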